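-- pv_equiv track=rewrite | github.com/arijitsh/tic-tac-toe | state.py | string_diff
-- ===== SOURCE A (Python) =====
-- def string_diff(a,b):
--     assert(len(a) == len(b))
--     i = 0
--     for c in a:
--         if b[i] != c:
--             break
--         else:
--             i += 1
--     j = len(a) - 1
--     for c in reversed(a):
--         if b[j] != c:
--             break
--         else:
--             j -= 1
--     return j-i
-- ===== SOURCE B (Python) =====
-- def string_diff(a, b):
--     assert(len(a) == len(b))
--     n = len(a)
--     first = n
--     last = -1
--     for k in range(n):
--         if a[k] != b[k]:
--             first = min(first, k)
--             last = max(last, k)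
--     return last - first
-- ===== Notes on version B (the rewrite author's own statement) =====
-- stated objective: alternative
-- what changed: A's two directional scans (forward over a, then over reversed(a)) are replaced by one forward pass that keeps the running min and max of mismatch indices; the all-equal sentinel last-first = -1-len(a) falls out of the initial values with no special case.
import Mathlib
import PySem

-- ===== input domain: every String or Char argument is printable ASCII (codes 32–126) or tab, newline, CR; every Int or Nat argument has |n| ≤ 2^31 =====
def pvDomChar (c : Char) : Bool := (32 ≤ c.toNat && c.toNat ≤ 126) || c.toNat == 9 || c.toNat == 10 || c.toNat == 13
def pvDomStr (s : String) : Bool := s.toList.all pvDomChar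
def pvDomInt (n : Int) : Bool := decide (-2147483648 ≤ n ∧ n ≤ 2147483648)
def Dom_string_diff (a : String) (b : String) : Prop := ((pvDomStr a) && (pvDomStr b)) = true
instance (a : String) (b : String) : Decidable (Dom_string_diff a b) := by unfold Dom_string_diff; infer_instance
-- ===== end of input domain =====

-- B replaces A's two directional scans with one forward pass keeping the running
-- min/max of mismatch indices (objective: alternative decomposition, same cost).

-- ===== PORT A =====
-- first loop: 'i = 0; for c in a: if b[i] != c: break else: i += 1'
def pvFwd (bs : List Char) (cs : List Char) (i : Int) : Int :=
  match cs with
  | [] => i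
  | c :: rest =>
    match PySem.List.pyGet? bs i with
    | none => i          -- IndexError: unreachable under Pre_ (equal lengths)
    | some ch => if ch ≠ c then i else pvFwd bs rest (i + 1)

-- second loop: 'j = len(a)-1; for c in reversed(a): if b[j] != c: break else: j -= 1'
def pvBwd (bs : List Char) (cs : List Char) (j : Int) : Int :=
  match cs with
  | [] => j
  | c :: rest =>
    match PySem.List.pyGet? bs j with
    | none => j          -- IndexError: unreachable under Pre_ (equal lengths)
    | some ch => if ch ≠ c then j else pvBwd bs rest (j - 1)

def string_diff (a : String) (b : String) : Int :=
  let as := a.toList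
  let bs := b.toList
  let i := pvFwd bs as 0
  let j := pvBwd bs as.reverse ((as.length : Int) - 1)
  j - i

-- ===== PORT B =====
def string_diff_alt (a : String) (b : String) : Int :=
  let as := a.toList
  let bs := b.toList
  let n : Int := as.length
  let p := (PySem.List.pyRange 0 n 1).foldl
    (fun (p : Int × Int) (k : Int) =>
      match PySem.List.pyGet? as k, PySem.List.pyGet? bs k with
      | some ca, some cb => if ca ≠ cb then (min p.1 k, max p.2 k) else p
      | _, _ => p)       -- IndexError: unreachable, k ranges over [0, len)
    (n, -1)
  p.2 - p.1

-- ===== PRECONDITION & SPEC =====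
-- A's assert requires the two strings to have the same length; Pre_ is exactly that.
def Pre_string_diff (a : String) (b : String) : Prop := a.toList.length = b.toList.length
instance (a : String) (b : String) : Decidable (Pre_string_diff a b) := by
  unfold Pre_string_diff; infer_instance

def pvWitness_string_diff : String × String := ("axcd", "abed")

def Spec_string_diff (a : String) (b : String) (out : Int) : Prop := out = string_diff_alt a b
instance (a : String) (b : String) (out : Int) : Decidable (Spec_string_diff a b out) := by
  unfold Spec_string_diff; infer_instance

-- ===== CLAIM (what is proved, stated in full; the proofs are below) =====
def Claim_equal_string_diff : Prop := ∀ (a : String) (b : String), Dom_string_diff a b → Pre_string_diff a b → Spec_string_diff a b (string_diff a b)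

-- ===== LEMMAS AND PROOFS =====

-- length of the longest common prefix of two lists
def pvPrefEq : List Char → List Char → Nat
  | c :: cs, d :: ds => if c = d then pvPrefEq cs ds + 1 else 0
  | _, _ => 0

lemma pvPrefEq_le_left : ∀ (xs ys : List Char), pvPrefEq xs ys ≤ xs.length := by
  intro xs
  induction xs with
  | nil => intro ys; cases ys <;> simp [pvPrefEq]
  | cons c cs ih =>
    intro ys
    cases ys with
    | nil => simp [pvPrefEq]
    | cons d ds =>
      simp only [pvPrefEq, List.length_cons]
      split_ifs with h
      · exact Nat.succ_le_succ (ih ds)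
      · omega

lemma pvPrefEq_self : ∀ (xs : List Char), pvPrefEq xs xs = xs.length := by
  intro xs
  induction xs with
  | nil => simp [pvPrefEq]
  | cons c cs ih => simp [pvPrefEq, ih]

lemma pvPrefEq_append_ne : ∀ (xs ys : List Char) (x y : Char),
    xs.length = ys.length → xs ≠ ys →
    pvPrefEq (xs ++ [x]) (ys ++ [y]) = pvPrefEq xs ys := by
  intro xs
  induction xs with
  | nil =>
    intro ys x y hlen hne
    cases ys with
    | nil => exact absurd rfl hne
    | cons d ds => simp at hlen
  | cons c cs ih =>
    intro ys x y hlen hne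
    cases ys with
    | nil => simp at hlen
    | cons d ds =>
      simp only [List.cons_append, pvPrefEq]
      split_ifs with h
      · subst h
        have hne' : cs ≠ ds := by intro h'; exact hne (by rw [h'])
        rw [ih ds x y (by simpa using hlen) hne']
      · rfl

lemma pvPrefEq_append_self : ∀ (u : List Char) (x y : Char), x ≠ y →
    pvPrefEq (u ++ [x]) (u ++ [y]) = u.length := by
  intro u
  induction u with
  | nil => intro x y h; simp [pvPrefEq, h]
  | cons c cs ih =>
    intro x y h
    simp [pvPrefEq, ih x y h]

lemma pvFwd_eq : ∀ (cs pre suf : List Char),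
    pvFwd (pre ++ suf) cs (pre.length : Int) = (pre.length : Int) + pvPrefEq cs suf := by
  intro cs
  induction cs with
  | nil => intro pre suf; simp [pvFwd, pvPrefEq]
  | cons c rest ih =>
    intro pre suf
    cases suf with
    | nil =>
      simp [pvFwd, pvPrefEq, PySem.List.pyGet?_natCast]
    | cons d suf' =>
      rw [pvFwd, PySem.List.pyGet?_append_length]
      by_cases h : d = c
      · subst h
        simp only [ne_eq, not_true_eq_false, if_false]
        have h1 : (pre.length : Int) + 1 = ((pre ++ [d]).length : Int) := by
          simp
        have h2 : pre ++ d :: suf' = (pre ++ [d]) ++ suf' := by simp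
        rw [h1, h2, ih (pre ++ [d]) suf']
        simp only [pvPrefEq, List.length_append, List.length_singleton]
        push_cast
        ring
      · have hne : d ≠ c := h
        simp only [ne_eq, hne, not_false_eq_true, if_true, pvPrefEq]
        rw [if_neg (fun hh => h hh.symm)]
        simp

lemma pvBwd_eq : ∀ (cs pre suf : List Char), cs.length ≤ pre.length →
    pvBwd (pre ++ suf) cs ((pre.length : Int) - 1)
      = (pre.length : Int) - 1 - pvPrefEq cs pre.reverse := by
  intro cs
  induction cs with
  | nil => intro pre suf h; simp [pvBwd, pvPrefEq]
  | cons c rest ih =>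
    intro pre suf hlen
    have hpre : pre ≠ [] := by
      intro h; subst h; simp at hlen
    rcases List.eq_nil_or_concat pre with rfl | ⟨p, d, rfl⟩
    · exact absurd rfl hpre
    simp only [List.concat_eq_append] at hlen ⊢
    have hidx : ((p ++ [d]).length : Int) - 1 = (p.length : Int) := by
      simp
    rw [hidx, pvBwd]
    have h2 : (p ++ [d]) ++ suf = p ++ (d :: suf) := by simp
    rw [h2, PySem.List.pyGet?_append_length]
    have hrev : (p ++ [d]).reverse = d :: p.reverse := by simp
    by_cases h : d = c
    · subst h
      simp only [ne_eq, not_true_eq_false, if_false, hrev, pvPrefEq]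
      have hlen' : rest.length ≤ p.length := by
        simp at hlen; omega
      have hih := ih p (d :: suf) hlen'
      rw [hih]
      simp only [if_true]
      push_cast
      ring
    · have hne : d ≠ c := h
      simp only [ne_eq, hne, not_false_eq_true, if_true, hrev, pvPrefEq]
      rw [if_neg (fun hh => h hh.symm)]
      simp

-- A computes (n - 1 - prefEq of reverses) - prefEq
lemma string_diff_eq (a b : String) (h : a.toList.length = b.toList.length) :
    string_diff a b
      = ((a.toList.length : Int) - 1 - pvPrefEq a.toList.reverse b.toList.reverse)
        - pvPrefEq a.toList b.toList := by
  unfold string_diff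
  have hfwd : pvFwd b.toList a.toList 0 = (0 : Int) + pvPrefEq a.toList b.toList := by
    have := pvFwd_eq a.toList [] b.toList
    simpa using this
  have hbwd : pvBwd b.toList a.toList.reverse ((a.toList.length : Int) - 1)
      = (a.toList.length : Int) - 1 - pvPrefEq a.toList.reverse b.toList.reverse := by
    have hb := pvBwd_eq a.toList.reverse b.toList []
    simp only [List.append_nil] at hb
    have hlen : a.toList.reverse.length ≤ b.toList.length := by simp [h]
    have hb' := hb hlen
    rw [h]
    exact hb'
  simp only [hfwd, hbwd]
  ring

-- B's loop, rephrased structurally over the two lists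
def pvLoop2 : List Char → List Char → Int → Int × Int → Int × Int
  | x :: xs, y :: ys, k, p =>
      pvLoop2 xs ys (k + 1) (if x ≠ y then (min p.1 k, max p.2 k) else p)
  | _, _, _, p => p

lemma pvFold_eq_loop2 (as bs : List Char) (hab : as.length = bs.length) :
    ∀ (xs ys : List Char) (i : Nat) (s : Int × Int),
    xs = as.drop i → ys = bs.drop i →
    ((PySem.List.pyRange (i : Int) (as.length : Int) 1).foldl
      (fun (p : Int × Int) (k : Int) =>
        match PySem.List.pyGet? as k, PySem.List.pyGet? bs k with
        | some ca, some cb => if ca ≠ cb then (min p.1 k, max p.2 k) else p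
        | _, _ => p) s)
      = pvLoop2 xs ys (i : Int) s := by
  intro xs
  induction xs with
  | nil =>
    intro ys i s hx hy
    have hi : as.length ≤ i := by
      have := congrArg List.length hx
      simp at this
      omega
    have hy' : ys = [] := by
      rw [hy, List.drop_eq_nil_iff]; omega
    subst hy'
    rw [PySem.List.pyRange_one_eq_nil (by exact_mod_cast hi)]
    simp [pvLoop2]
  | cons x xs' ih =>
    intro ys i s hx hy
    have hi : i < as.length := by
      by_contra hcon
      have hnil : as.drop i = [] := List.drop_eq_nil_iff.mpr (by omega)
      rw [hnil] at hx
      simp at hx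
    have hi' : i < bs.length := hab ▸ hi
    have hda := List.drop_eq_getElem_cons hi
    have hdb := List.drop_eq_getElem_cons hi'
    rw [hda] at hx
    rw [hdb] at hy
    have hgx : as[i]? = some x := by
      rw [List.getElem?_eq_getElem hi]
      injection hx with h1 _
      rw [h1]
    have hgy : bs[i]? = some (bs[i]) := List.getElem?_eq_getElem hi'
    rw [PySem.List.pyRange_one_cons (by exact_mod_cast hi)]
    rw [List.foldl_cons]
    have hstep :
        (match PySem.List.pyGet? as (i : Int), PySem.List.pyGet? bs (i : Int) with
        | some ca, some cb => if ca ≠ cb then (min s.1 (i : Int), max s.2 (i : Int)) else s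
        | _, _ => s)
        = (if x ≠ bs[i] then (min s.1 (i : Int), max s.2 (i : Int)) else s) := by
      rw [PySem.List.pyGet?_natCast, PySem.List.pyGet?_natCast, hgx, hgy]
    rw [hstep]
    have hx' : xs' = as.drop (i + 1) := by
      injection hx with _ h2
    have hcast : (i : Int) + 1 = ((i + 1 : Nat) : Int) := by push_cast; ring
    rw [hcast, ih (bs.drop (i+1)) (i+1) _ hx' rfl, hy, pvLoop2, ← hcast]

lemma pvLoop2_spec : ∀ (xs ys : List Char), xs.length = ys.length →
    ∀ (k : Nat) (f l : Int), l < (k : Int) →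
    pvLoop2 xs ys (k : Int) (f, l)
      = if xs = ys then (f, l)
        else (min f ((k : Int) + pvPrefEq xs ys),
              (k : Int) + ((xs.length : Int) - 1 - pvPrefEq xs.reverse ys.reverse)) := by
  intro xs
  induction xs with
  | nil =>
    intro ys hlen k f l hl
    have : ys = [] := by cases ys <;> simp_all
    subst this
    simp [pvLoop2]
  | cons x xs' ih =>
    intro ys hlen k f l hl
    cases ys with
    | nil => simp at hlen
    | cons y ys' =>
      have hlen' : xs'.length = ys'.length := by simpa using hlen
      have hcast : (k : Int) + 1 = ((k + 1 : Nat) : Int) := by push_cast; ring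
      by_cases hxy : x = y
      · subst hxy
        rw [pvLoop2, if_neg (by simp)]
        by_cases htail : xs' = ys'
        · subst htail
          rw [hcast, ih xs' rfl (k+1) f l (by push_cast at hl ⊢; omega)]
          simp
        · have hne : (x :: xs') ≠ (x :: ys') := by
            intro hh; exact htail (by injection hh)
          rw [hcast, ih ys' hlen' (k+1) f l (by push_cast at hl ⊢; omega)]
          rw [if_neg htail, if_neg hne]
          have hrevne : xs'.reverse ≠ ys'.reverse := by
            intro hh; exact htail (by
              have := congrArg List.reverse hh; simpa using this)
          have hE : pvPrefEq (x :: xs').reverse (x :: ys').reverse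
              = pvPrefEq xs'.reverse ys'.reverse := by
            simp only [List.reverse_cons]
            exact pvPrefEq_append_ne _ _ _ _ (by simp [hlen']) hrevne
          have hP : pvPrefEq (x :: xs') (x :: ys') = pvPrefEq xs' ys' + 1 := by
            simp [pvPrefEq]
          rw [hE, hP]
          simp only [Prod.mk.injEq, List.length_cons]
          constructor
          · congr 1
            push_cast
            ring
          · push_cast
            ring
      · have hne : (x :: xs') ≠ (y :: ys') := by
          intro hh; exact hxy (by injection hh)
        rw [pvLoop2, if_pos hxy, if_neg hne]
        have hmax : max l (k : Int) = (k : Int) := by omega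
        rw [hmax]
        by_cases htail : xs' = ys'
        · subst htail
          rw [hcast, ih xs' rfl (k+1) (min f k) k (by push_cast; omega), if_pos rfl]
          have hE : pvPrefEq (x :: xs').reverse (y :: xs').reverse = xs'.length := by
            simp only [List.reverse_cons]
            rw [pvPrefEq_append_self _ _ _ hxy]
            simp
          have hP : pvPrefEq (x :: xs') (y :: xs') = 0 := by
            simp [pvPrefEq, hxy]
          rw [hE, hP]
          simp only [Prod.mk.injEq, List.length_cons]
          constructor
          · push_cast; omega
          · push_cast; omega
        · rw [hcast, ih ys' hlen' (k+1) (min f k) k (by push_cast; omega), if_neg htail]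
          have hrevne : xs'.reverse ≠ ys'.reverse := by
            intro hh; exact htail (by
              have := congrArg List.reverse hh; simpa using this)
          have hE : pvPrefEq (x :: xs').reverse (y :: ys').reverse
              = pvPrefEq xs'.reverse ys'.reverse := by
            simp only [List.reverse_cons]
            exact pvPrefEq_append_ne _ _ _ _ (by simp [hlen']) hrevne
          have hP : pvPrefEq (x :: xs') (y :: ys') = 0 := by
            simp [pvPrefEq, hxy]
          rw [hE, hP]
          simp only [Prod.mk.injEq, List.length_cons]
          constructor
          · push_cast; omega
          · push_cast; omega

-- B computes the same quantity
lemma string_diff_alt_eq (a b : String) (h : a.toList.length = b.toList.length) :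
    string_diff_alt a b
      = ((a.toList.length : Int) - 1 - pvPrefEq a.toList.reverse b.toList.reverse)
        - pvPrefEq a.toList b.toList := by
  have h0 := pvFold_eq_loop2 a.toList b.toList h a.toList b.toList 0
      (((a.toList.length : Int)), -1) (by simp) (by simp)
  simp only [Nat.cast_zero] at h0
  have h1 := pvLoop2_spec a.toList b.toList h 0 ((a.toList.length : Int)) (-1) (by norm_num)
  simp only [Nat.cast_zero] at h1
  unfold string_diff_alt
  simp only []
  rw [h0, h1]
  by_cases heq : a.toList = b.toList
  · rw [if_pos heq, heq, pvPrefEq_self, pvPrefEq_self]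
    simp only [List.length_reverse]
    omega
  · rw [if_neg heq]
    have hd : (pvPrefEq a.toList b.toList : Int) ≤ (a.toList.length : Int) := by
      exact_mod_cast pvPrefEq_le_left a.toList b.toList
    simp only []
    omega

-- ===== VERDICT (by name: the statement is the Claim_ definition above) =====
theorem string_diff_spec : Claim_equal_string_diff := by
  intro a b _ hpre
  unfold Spec_string_diff
  rw [string_diff_eq a b hpre, string_diff_alt_eq a b hpre]
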